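-- pv_equiv track=rewrite | github.com/gg-xyz/sigmaobf | sigobf.py | _convert_to_one_liner
-- ===== SOURCE A (Python) =====
-- def _convert_to_one_liner(code: str) -> str:
--     """Convert obfuscated code to a one-liner."""
--     # This is a generic implementation - override in subclasses if needed
--     result = ""
--     in_string = False
--     string_delimiter = None
--     i = 0
--
--     while i < len(code):
--         char = code[i]
--
--         # Handle string delimiters
--         if char in ['"', "'"] and (i == 0 or code[i-1] != '\\'):
--             if not in_string:
--                 in_string = True
--                 string_delimiter = char
--             elif char == string_delimiter:
--                 in_string = False
--             result += char
--         # Keep all characters within strings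
--         elif in_string:
--             result += char
--         # Replace whitespace outside strings
--         elif char.isspace():
--             # Add a space only if necessary for syntax
--             if (i > 0 and i < len(code) - 1 and
--                 (code[i-1].isalnum() and code[i+1].isalnum() or
--                  code[i-1] in [')', ']'] and code[i+1] in ['(', '['])):
--                 result += ' '
--         else:
--             result += char
--
--         i += 1
--
--     return result
-- ===== SOURCE B (Python) =====
-- def _convert_to_one_liner(code: str) -> str:
--     """Convert obfuscated code to a one-liner (two-pass: string mask, then emit)."""
--     n = len(code)
--     in_s = False
--     delim = None
--     mask = []
--     for i, ch in enumerate(code):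
--         if ch in '"\'' and (i == 0 or code[i - 1] != '\\'):
--             if not in_s:
--                 in_s = True
--                 delim = ch
--             elif ch == delim:
--                 in_s = False
--             mask.append(True)
--         else:
--             mask.append(in_s)
--     out = []
--     for i, (ch, m) in enumerate(zip(code, mask)):
--         if m or not ch.isspace():
--             out.append(ch)
--         elif 0 < i < n - 1 and (code[i - 1].isalnum() and code[i + 1].isalnum()
--                                 or code[i - 1] in ')]' and code[i + 1] in '(['):
--             out.append(' ')
--     return ''.join(out)
-- ===== Notes on version B (the rewrite author's own statement) =====
-- stated objective: faster
-- what changed: A's single stateful while-loop with repeated string concatenation is split into two separately-shaped passes: a first scan computing a per-index in-string/verbatim mask via the quote-toggling rule, then an emission pass over characters zipped with that mask, collecting output in a list joined once at the end.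
import Mathlib
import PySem

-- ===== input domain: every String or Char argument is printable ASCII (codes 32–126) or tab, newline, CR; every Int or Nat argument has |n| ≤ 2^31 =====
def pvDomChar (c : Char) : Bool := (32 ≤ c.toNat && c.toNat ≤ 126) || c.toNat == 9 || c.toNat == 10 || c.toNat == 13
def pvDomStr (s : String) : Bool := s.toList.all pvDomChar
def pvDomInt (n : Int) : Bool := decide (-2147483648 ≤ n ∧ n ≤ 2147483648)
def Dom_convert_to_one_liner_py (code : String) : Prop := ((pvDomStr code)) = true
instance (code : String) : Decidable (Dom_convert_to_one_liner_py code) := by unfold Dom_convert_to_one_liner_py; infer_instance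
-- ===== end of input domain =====

-- B re-decomposes A's single stateful while-loop into two passes (an in-string mask, then emission); same output, alternative structure.

-- ===== PORT A =====
-- literal transliteration of A's while-loop: index i, accumulator result, in_string, string_delimiter
def aLoop (cs : List Char) (i : Nat) (result : List Char) (in_string : Bool)
    (string_delimiter : Option Char) : List Char :=
  if i < cs.length then
    let char := cs.getD i ' '
    if (char = '"' || char = '\'') && (i == 0 || !(cs.getD (i - 1) ' ' == '\\')) then
      if !in_string then
        aLoop cs (i + 1) (result ++ [char]) true (some char)
      else if some char == string_delimiter then
        aLoop cs (i + 1) (result ++ [char]) false string_delimiter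
      else
        aLoop cs (i + 1) (result ++ [char]) in_string string_delimiter
    else if in_string then
      aLoop cs (i + 1) (result ++ [char]) in_string string_delimiter
    else if PySem.Chars.isspace char then
      if 0 < i && i < cs.length - 1 &&
          ((PySem.Chars.isalnum (cs.getD (i - 1) ' ') && PySem.Chars.isalnum (cs.getD (i + 1) ' '))
           || ((cs.getD (i - 1) ' ' = ')' || cs.getD (i - 1) ' ' = ']')
               && (cs.getD (i + 1) ' ' = '(' || cs.getD (i + 1) ' ' = '['))) then
        aLoop cs (i + 1) (result ++ [' ']) in_string string_delimiter
      else
        aLoop cs (i + 1) result in_string string_delimiter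
    else
      aLoop cs (i + 1) (result ++ [char]) in_string string_delimiter
  else
    result
termination_by cs.length - i

def convert_to_one_liner_py (code : String) : String :=
  String.mk (aLoop code.toList 0 [] false none)

-- ===== PORT B =====
-- pass 1: per-index in-string mask (True = copy the character verbatim)
def bMask (cs : List Char) (i : Nat) (in_s : Bool) (delim : Option Char) : List Bool :=
  if i < cs.length then
    let ch := cs.getD i ' '
    if (ch = '"' || ch = '\'') && (i == 0 || !(cs.getD (i - 1) ' ' == '\\')) then
      if !in_s then true :: bMask cs (i + 1) true (some ch)
      else if some ch == delim then true :: bMask cs (i + 1) false delim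
      else true :: bMask cs (i + 1) in_s delim
    else
      in_s :: bMask cs (i + 1) in_s delim
  else []
termination_by cs.length - i

-- pass 2: emit from characters zipped with their mask
def bEmit (cs : List Char) (i : Nat) (mask : List Bool) : List Char :=
  match mask with
  | [] => []
  | m :: rest =>
    let ch := cs.getD i ' '
    (if m || !(PySem.Chars.isspace ch) then [ch]
     else if 0 < i && i < cs.length - 1 &&
          ((PySem.Chars.isalnum (cs.getD (i - 1) ' ') && PySem.Chars.isalnum (cs.getD (i + 1) ' '))
           || ((cs.getD (i - 1) ' ' = ')' || cs.getD (i - 1) ' ' = ']')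
               && (cs.getD (i + 1) ' ' = '(' || cs.getD (i + 1) ' ' = '['))) then [' ']
     else []) ++ bEmit cs (i + 1) rest

def convert_to_one_liner_py_alt (code : String) : String :=
  String.mk (bEmit code.toList 0 (bMask code.toList 0 false none))

-- ===== PRECONDITION & SPEC =====
def Spec_convert_to_one_liner_py (code : String) (out : String) : Prop := out = convert_to_one_liner_py_alt code
instance (code : String) (out : String) : Decidable (Spec_convert_to_one_liner_py code out) := by unfold Spec_convert_to_one_liner_py; infer_instance

-- ===== CLAIM (what is proved, stated in full; the proofs are below) =====
def Claim_equal_convert_to_one_liner_py : Prop := ∀ (code : String), Dom_convert_to_one_liner_py code → Spec_convert_to_one_liner_py code (convert_to_one_liner_py code)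

-- ===== LEMMAS AND PROOFS =====

-- A's loop from index i equals the already-built result followed by B's emission of B's mask from i.
theorem aLoop_eq_emit (cs : List Char) :
    ∀ (k i : Nat), cs.length - i ≤ k → ∀ (res : List Char) (s : Bool) (d : Option Char),
      aLoop cs i res s d = res ++ bEmit cs i (bMask cs i s d) := by
  intro k
  induction k with
  | zero =>
    intro i hi res s d
    have h : ¬ i < cs.length := by omega
    rw [aLoop, bMask]
    simp [h, bEmit]
  | succ k ih =>
    intro i hi res s d
    by_cases h : i < cs.length
    · have hk : cs.length - (i + 1) ≤ k := by omega
      rw [aLoop, bMask]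
      simp only [h, if_true]
      split_ifs <;>
        simp_all [bEmit, ih (i + 1) hk, List.append_assoc, List.getD]
    · rw [aLoop, bMask]
      simp [h, bEmit]

-- ===== VERDICT (by name: the statement is the Claim_ definition above) =====
theorem convert_to_one_liner_py_spec : Claim_equal_convert_to_one_liner_py := by
  intro code _
  unfold Spec_convert_to_one_liner_py convert_to_one_liner_py convert_to_one_liner_py_alt
  rw [aLoop_eq_emit code.toList (code.toList.length) 0 (by omega)]
  simp
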